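-- pv_equiv track=rewrite | github.com/cclienti/svmodule | svmodule/parser.py | remove_multiline_comments
-- ===== SOURCE A (Python) =====
-- def remove_multiline_comments(strval):
--     state = 0
--     strnew = ''
--     L = len(strval)
--
--     for i in range(L):
--         if i < (L-1):
--             if strval[i] == '/' and strval[i+1] == '*':
--                 state = 1
--
--         if i > 1:
--             if strval[i-2] == '*' and strval[i-1] == '/':
--                 state = 0
--
--         if state == 0:
--             strnew += strval[i]
--     return strnew
-- ===== SOURCE B (Python) =====
-- def remove_multiline_comments(strval):
--     p = strval.find('/*')
--     if p < 0:
--         return strval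
--     q = strval.find('*/', p + 1)
--     if q < 0:
--         return strval[:p]
--     return strval[:p] + remove_multiline_comments(strval[q + 2:])
-- ===== Notes on version B (the rewrite author's own statement) =====
-- stated objective: faster
-- what changed: Replaces the per-character state-flag scan with lookback/lookahead indexing by a find-and-splice recursion (locate '/*', keep the text before it, find the matching '*/' from p+1, recurse on the remainder); the work moves from a per-char Python loop with string concatenation into a few str.find calls and slice copies.
-- intended difference: On strings containing '*/*' or '*//*' (a '/*' opener whose '/' is preceded by '*', or a '/*' starting right after a '*/' close), A's close-lookback cancels the freshly opened comment and returns the comment text uncensored (e.g. 'x*/*y' -> 'x**y'), while B removes the comment ('x*/*y' -> 'x*'), which is the intended behaviour of a comment stripper. — e.g. on remove_multiline_comments("x*/*y"): A returns "x**y", B returns "x*"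
import Mathlib
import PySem

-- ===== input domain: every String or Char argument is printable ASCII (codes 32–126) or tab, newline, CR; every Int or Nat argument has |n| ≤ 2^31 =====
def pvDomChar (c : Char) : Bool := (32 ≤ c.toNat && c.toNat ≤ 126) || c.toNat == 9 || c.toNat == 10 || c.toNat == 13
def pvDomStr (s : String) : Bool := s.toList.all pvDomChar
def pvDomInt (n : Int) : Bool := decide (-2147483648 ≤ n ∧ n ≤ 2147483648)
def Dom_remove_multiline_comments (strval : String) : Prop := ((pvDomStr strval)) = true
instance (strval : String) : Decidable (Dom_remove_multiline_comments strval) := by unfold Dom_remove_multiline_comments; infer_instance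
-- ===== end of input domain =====

-- B strips /* */ comments by find-and-splice recursion instead of A's per-character state flag;
-- on the corner strings of D_ below A fails to open a comment and B's value is the intended one.

-- ===== PORT A =====
-- loop body of A's 'for i in range(L)' (state : Int, strnew : List Char)
def pvAstep (s : List Char) (L : Nat) (acc : Int × List Char) (i : Nat) : Int × List Char :=
  let state := acc.1
  let state := if i < L - 1 then
      (if s.getD i ' ' == '/' && s.getD (i + 1) ' ' == '*' then 1 else state)
    else state
  let state := if 1 < i then
      (if s.getD (i - 2) ' ' == '*' && s.getD (i - 1) ' ' == '/' then 0 else state)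
    else state
  let strnew := if state == (0 : Int) then acc.2 ++ [s.getD i ' '] else acc.2
  (state, strnew)

def remove_multiline_comments (strval : String) : String :=
  let s := strval.toList
  let L := s.length
  String.ofList ((List.range L).foldl (pvAstep s L) ((0 : Int), ([] : List Char))).2

-- ===== PORT B =====
-- recursive find-and-splice on the character list (Source B's recursion, slices via PySem)
def pvBrec (s : List Char) : List Char :=
  let p := PySem.Chars.find s ['/', '*']
  if hp : p < 0 then s
  else
    let q := PySem.Chars.findFrom s ['*', '/'] (p + 1) none
    if hq : q < 0 then PySem.List.slice s none (some p)
    else PySem.List.slice s none (some p) ++ pvBrec (PySem.List.slice s (some (q + 2)) none)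
termination_by s.length
decreasing_by
  have hp0 : 0 ≤ PySem.Chars.find s ['/', '*'] := le_of_not_gt hp
  have hpre := PySem.Chars.find_spec (s := s) (sub := ['/', '*']) hp0
  have hslen : 0 < s.length := by
    rcases hpre.1 with ⟨t, ht⟩
    have : (PySem.Chars.find s ['/', '*']).toNat < s.length := by
      by_contra hc
      rw [List.drop_eq_nil_of_le (le_of_not_gt hc)] at ht
      simp at ht
    omega
  have hq0 : 0 ≤ PySem.Chars.findFrom s ['*', '/'] (PySem.Chars.find s ['/', '*'] + 1) none :=
    le_of_not_gt hq
  have hq2 : PySem.Chars.findFrom s ['*', '/'] (PySem.Chars.find s ['/', '*'] + 1) none + 2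
      = (((PySem.Chars.findFrom s ['*', '/'] (PySem.Chars.find s ['/', '*'] + 1) none).toNat + 2 : Nat) : Int) := by
    omega
  rw [hq2, PySem.List.slice_from_natCast]
  simp only [List.length_drop]
  omega

def remove_multiline_comments_alt (strval : String) : String :=
  String.ofList (pvBrec strval.toList)

-- ===== PRECONDITION & SPEC =====
-- On strings containing '*/*' or '*//*' (a '/*' opener whose '/' is preceded by '*', or a '/*'
-- starting right after a '*/' close), A's close-lookback cancels the freshly opened comment and
-- returns the comment text uncensored; B removes the comment, the intended behaviour.
def D_remove_multiline_comments (strval : String) : Prop :=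
  PySem.Str.isIn "*/*" strval = true ∨ PySem.Str.isIn "*//*" strval = true
instance (strval : String) : Decidable (D_remove_multiline_comments strval) := by
  unfold D_remove_multiline_comments; infer_instance

def Spec_remove_multiline_comments (strval : String) (out : String) : Prop :=
  ¬ D_remove_multiline_comments strval → out = remove_multiline_comments_alt strval
instance (strval : String) (out : String) : Decidable (Spec_remove_multiline_comments strval out) := by
  unfold Spec_remove_multiline_comments; infer_instance

def pvDiffWitness_remove_multiline_comments : String := "x*/*y"
def pvDiffWitnessOut_remove_multiline_comments : String × String := ("x**y", "x*")

-- ===== CLAIM (what is proved, stated in full; the proofs are below) =====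
def Claim_unchanged_remove_multiline_comments : Prop := ∀ (strval : String), Dom_remove_multiline_comments strval → Spec_remove_multiline_comments strval (remove_multiline_comments strval)
def Claim_changed_remove_multiline_comments : Prop := Dom_remove_multiline_comments (pvDiffWitness_remove_multiline_comments) ∧ D_remove_multiline_comments (pvDiffWitness_remove_multiline_comments) ∧ remove_multiline_comments (pvDiffWitness_remove_multiline_comments) = pvDiffWitnessOut_remove_multiline_comments.1 ∧ remove_multiline_comments_alt (pvDiffWitness_remove_multiline_comments) = pvDiffWitnessOut_remove_multiline_comments.2 ∧ pvDiffWitnessOut_remove_multiline_comments.1 ≠ pvDiffWitnessOut_remove_multiline_comments.2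

-- ===== LEMMAS AND PROOFS =====

-- structural model of A's scan: history (chars at i-2, i-1), comment flag, rest of the string
def pvM : Option Char → Option Char → Bool → List Char → List Char
  | _, _, _, [] => []
  | a, b, st, c :: rest =>
    let st1 := if c == '/' && rest.head? == some '*' then true else st
    let st2 := if a == some '*' && b == some '/' then false else st1
    if st2 then pvM b (some c) st2 rest else c :: pvM b (some c) st2 rest

-- history slots after consuming n characters of s, starting from history (a, b)
def pvH1 (b : Option Char) (s : List Char) (n : Nat) : Option Char :=
  if n = 0 then b else s[n-1]?
def pvH2 (a b : Option Char) (s : List Char) (n : Nat) : Option Char :=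
  if n = 0 then a else if n = 1 then b else s[n-2]?

theorem pvM_nil (a b : Option Char) (st : Bool) : pvM a b st [] = [] := by
  cases st <;> rfl

theorem bridge (s : List Char) : ∀ (n k : Nat) (b : Bool) (out : List Char),
    k + n = s.length →
    ∃ b' : Bool, (List.range' k n).foldl (pvAstep s s.length) ((if b then 1 else 0 : Int), out)
      = ((if b' then 1 else 0 : Int), out ++ pvM (pvH2 none none s k) (pvH1 none s k) b (s.drop k)) := by
  intro n
  induction n with
  | zero =>
    intro k b out hk
    refine ⟨b, ?_⟩
    rw [List.drop_eq_nil_of_le (by omega), pvM_nil]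
    simp
  | succ n ih =>
    intro k b out hk
    have hklt : k < s.length := by omega
    have hdrop : s.drop k = s[k] :: s.drop (k + 1) := List.drop_eq_getElem_cons hklt
    have hget : s.getD k ' ' = s[k] := List.getD_eq_getElem s ' ' hklt
    have hgx : s[k]? = some s[k] := List.getElem?_eq_getElem hklt
    -- A's open-test equals M's open-test
    have hopen : ∀ st : Int, (if k < s.length - 1 then
          (if s.getD k ' ' == '/' && s.getD (k + 1) ' ' == '*' then 1 else st) else st)
        = (if s[k] == '/' && s[k+1]? == some '*' then 1 else st) := by
      intro st
      by_cases h : k < s.length - 1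
      · have h1 : k + 1 < s.length := by omega
        simp [h, List.getElem?_eq_getElem h1, List.getElem?_eq_getElem hklt]
      · have h1 : s[k+1]? = none := List.getElem?_eq_none (by omega)
        simp [h, h1]
    -- A's close-test equals M's close-test
    have hclose : ∀ st : Int, (if 1 < k then
          (if s.getD (k - 2) ' ' == '*' && s.getD (k - 1) ' ' == '/' then 0 else st) else st)
        = (if pvH2 none none s k == some '*' && pvH1 none s k == some '/' then 0 else st) := by
      intro st
      match k, hklt with
      | 0, _ => simp [pvH2, pvH1]
      | 1, _ => simp [pvH2, pvH1]
      | (m+2), h =>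
        have h2 : m < s.length := by omega
        have h1 : m + 1 < s.length := by omega
        rw [pvH2, pvH1]
        simp [List.getElem?_eq_getElem h2, List.getElem?_eq_getElem h1]
    -- the combined flag after step k
    set b2 : Bool := (if pvH2 none none s k == some '*' && pvH1 none s k == some '/' then false
        else if s[k] == '/' && s[k+1]? == some '*' then true else b) with hb2
    have hstep : pvAstep s s.length ((if b then 1 else 0 : Int), out) k
        = ((if b2 then 1 else 0 : Int), out ++ (if b2 then [] else [s[k]])) := by
      simp only [pvAstep]
      rw [hclose, hopen, hb2]
      by_cases hc : (pvH2 none none s k == some '*' && pvH1 none s k == some '/') = true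
      · simp [hc, hgx]
      · rw [Bool.not_eq_true] at hc
        by_cases ho : (s[k] == '/' && s[k+1]? == some '*') = true
        · simp [hc, ho]
        · rw [Bool.not_eq_true] at ho
          cases b <;> simp [hc, ho, hgx]
    have hMstep : pvM (pvH2 none none s k) (pvH1 none s k) b (s.drop k)
        = (if b2 then [] else [s[k]]) ++ pvM (pvH1 none s k) (some s[k]) b2 (s.drop (k + 1)) := by
      rw [hdrop, pvM]
      simp only [List.head?_drop, hb2]
      by_cases hc : (pvH2 none none s k == some '*' && pvH1 none s k == some '/') = true
      · simp [hc]
      · rw [Bool.not_eq_true] at hc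
        by_cases ho : (s[k] == '/' && s[k+1]? == some '*') = true
        · simp [hc, ho]
        · rw [Bool.not_eq_true] at ho
          cases b <;> simp [hc, ho]
    have hH1 : pvH1 none s (k + 1) = some s[k] := by
      rw [pvH1]
      simp [List.getElem?_eq_getElem hklt]
    have hH2 : pvH2 none none s (k + 1) = pvH1 none s k := by
      rw [pvH2, pvH1]
      match k with
      | 0 => simp
      | m + 1 => simp
    rw [List.range'_succ, List.foldl_cons, hstep]
    obtain ⟨b', hb'⟩ := ih (k + 1) b2 (out ++ (if b2 then [] else [s[k]])) (by omega)
    refine ⟨b', ?_⟩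
    rw [hb', hH1, hH2, hMstep]
    simp

theorem fold_eq_pvM (s : List Char) :
    ((List.range s.length).foldl (pvAstep s s.length) ((0 : Int), ([] : List Char))).2
      = pvM none none false s := by
  obtain ⟨b', hb'⟩ := bridge s s.length 0 false [] (by omega)
  rw [List.range_eq_range']
  rw [show ((0 : Int), ([] : List Char)) = ((if false then 1 else 0 : Int), ([] : List Char)) from rfl]
  rw [hb']
  simp [pvH1, pvH2]

-- prefix/infix bookkeeping
theorem pair_prefix {x y : Char} {w : List Char} :
    [x, y] <+: w ↔ w[0]? = some x ∧ w[1]? = some y := by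
  rw [List.prefix_iff_getElem?]
  constructor
  · intro h
    exact ⟨h 0 (by simp), h 1 (by simp)⟩
  · rintro ⟨h0, h1⟩ i hi
    match i, hi with
    | 0, _ => simpa using h0
    | 1, _ => simpa using h1

theorem pair_prefix_drop {x y : Char} {u : List Char} {j : Nat} :
    [x, y] <+: u.drop j ↔ u[j]? = some x ∧ u[j + 1]? = some y := by
  rw [pair_prefix]
  rw [List.getElem?_drop, List.getElem?_drop]
  simp

theorem infix_of_prefix_drop {sub s : List Char} {j : Nat} (h : sub <+: s.drop j) :
    sub <:+: s :=
  h.isInfix.trans (s.drop_suffix j).isInfix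

-- the second history slot is irrelevant when it is not '*'
theorem hist2_irrel {x : Char} (hx : x ≠ '*') (b : Option Char) (st : Bool) (l : List Char) :
    pvM (some x) b st l = pvM none b st l := by
  cases l with
  | nil => rfl
  | cons c rest =>
    rw [pvM, pvM]
    have : (some x == some '*') = false := by simpa using hx
    simp [this]

-- copy segment: with the flag down and no '/*' anywhere, pvM copies the string
theorem pvM_copy (s : List Char) : ∀ (a b : Option Char),
    ¬ (['/', '*'] <:+: s) → pvM a b false s = s := by
  induction s with
  | nil => intro a b _; rfl
  | cons c rest ih =>
    intro a b h
    have h0 : ((c :: rest)[0]? = some '/' ∧ (c :: rest)[1]? = some '*') → False := by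
      intro hc
      exact h (pair_prefix.mpr hc).isInfix
    have hb : (c == '/' && rest.head? == some '*') = false := by
      rw [Bool.and_eq_false_iff]
      by_cases hcc : c = '/'
      · right
        rw [beq_eq_false_iff_ne]
        intro hh
        exact h0 ⟨by simp [hcc], by simpa [List.getElem?_cons_succ, ← List.head?_eq_getElem?] using hh⟩
      · left; simpa using hcc
    have h1 : ¬ (['/', '*'] <:+: rest) := fun hi => h (hi.trans (List.suffix_cons c rest).isInfix)
    rw [pvM]
    simp only [hb, Bool.false_eq_true, if_false, ite_self]
    exact congrArg (c :: ·) (ih b (some c) h1)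

-- history shifting
theorem pvH1_shift (b : Option Char) (c : Char) (rest : List Char) (i : Nat) :
    pvH1 (some c) rest i = pvH1 b (c :: rest) (i + 1) := by
  cases i with
  | zero => simp [pvH1]
  | succ m => simp [pvH1]

theorem pvH2_shift (a b : Option Char) (c : Char) (rest : List Char) (i : Nat) :
    pvH2 b (some c) rest i = pvH2 a b (c :: rest) (i + 1) := by
  match i with
  | 0 => simp [pvH2]
  | 1 => simp [pvH2]
  | m + 2 => simp [pvH2]

-- prefix copy segment, positional form
theorem pvM_pre : ∀ (n : Nat) (u : List Char) (a b : Option Char),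
    (∀ i, i < n → ¬ (['/', '*'] <+: u.drop i)) →
    pvM a b false u = u.take n ++ pvM (pvH2 a b u n) (pvH1 b u n) false (u.drop n) := by
  intro n
  induction n with
  | zero => intro u a b _; simp [pvH1, pvH2]
  | succ n ih =>
    intro u a b h
    cases u with
    | nil => simp [pvM_nil]
    | cons c rest =>
      have h0 := h 0 (by omega)
      have hb : (c == '/' && rest.head? == some '*') = false := by
        rw [Bool.and_eq_false_iff]
        by_cases hcc : c = '/'
        · right
          rw [beq_eq_false_iff_ne]
          intro hh
          exact h0 (pair_prefix.mpr ⟨by simp [hcc], by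
            simpa [List.getElem?_cons_succ, ← List.head?_eq_getElem?] using hh⟩)
        · left; simpa using hcc
      rw [pvM]
      simp only [hb, Bool.false_eq_true, if_false, ite_self]
      rw [ih rest b (some c) (fun i hi => by
        have := h (i + 1) (by omega)
        simpa using this)]
      simp only [List.take_succ_cons, List.drop_succ_cons, List.cons_append]
      rw [pvH1_shift b c rest n, pvH2_shift a b c rest n]

-- skip segment, positional form
theorem pvM_skip : ∀ (n : Nat) (u : List Char) (a b : Option Char),
    (∀ i, i < n → ¬ (pvH2 a b u i = some '*' ∧ pvH1 b u i = some '/')) →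
    pvM a b true u = pvM (pvH2 a b u n) (pvH1 b u n) true (u.drop n) := by
  intro n
  induction n with
  | zero => intro u a b _; simp [pvH1, pvH2]
  | succ n ih =>
    intro u a b h
    cases u with
    | nil => simp [pvM_nil]
    | cons c rest =>
      have h0 := h 0 (by omega)
      have hb : (a == some '*' && b == some '/') = false := by
        rw [Bool.and_eq_false_iff]
        by_cases ha : a = some '*'
        · right
          rw [beq_eq_false_iff_ne]
          intro hh
          exact h0 ⟨by simpa [pvH2] using ha, by simpa [pvH1] using hh⟩
        · left; simpa using ha
      rw [pvM]
      simp only [ite_self, hb, Bool.false_eq_true, if_false]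
      rw [ih rest b (some c) (fun i hi => by
        have := h (i + 1) (by omega)
        rw [← pvH1_shift b c rest i, ← pvH2_shift a b c rest i] at this
        exact this)]
      simp only [List.drop_succ_cons]
      rw [pvH1_shift b c rest n, pvH2_shift a b c rest n]
      simp

theorem pvBrec_nil : pvBrec [] = [] := by
  rw [pvBrec.eq_def]
  norm_num [show PySem.Chars.find [] ['/', '*'] = -1 from rfl]

-- main: outside the D_ patterns the two sides agree
theorem pvM_eq_pvBrec : ∀ (N : Nat) (s : List Char), s.length ≤ N →
    ¬ (['*', '/', '*'] <:+: s) → ¬ (['*', '/', '/', '*'] <:+: s) →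
    pvM none none false s = pvBrec s := by
  intro N
  induction N with
  | zero =>
    intro s hlen _ _
    have hs : s = [] := List.length_eq_zero_iff.mp (by omega)
    rw [hs, pvBrec_nil, pvM_nil]
  | succ N ih =>
    intro s hlen h1 h2
    rw [pvBrec.eq_def]
    by_cases hp : PySem.Chars.find s ['/', '*'] < 0
    · rw [dif_pos hp]
      apply pvM_copy
      intro hinf
      have := (PySem.Chars.find_nonneg_iff (s := s) (sub := ['/', '*'])).mpr hinf
      omega
    · rw [dif_neg hp]
      have hp0 : (0 : Int) ≤ PySem.Chars.find s ['/', '*'] := le_of_not_gt hp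
      obtain ⟨P, hfind⟩ : ∃ P : Nat, PySem.Chars.find s ['/', '*'] = (P : Int) :=
        ⟨(PySem.Chars.find s ['/', '*']).toNat, by omega⟩
      obtain ⟨hpre, hmin⟩ := PySem.Chars.find_spec (s := s) (sub := ['/', '*']) hp0
      rw [hfind] at hpre hmin
      simp only [Int.toNat_natCast] at hpre hmin
      obtain ⟨t0, ht0⟩ := hpre
      have hdropP : s.drop P = '/' :: '*' :: t0 := by rw [← ht0]; rfl
      obtain ⟨hsP, hsP1⟩ := pair_prefix_drop.mp ⟨t0, ht0⟩
      have hP2 : P + 2 ≤ s.length := by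
        obtain ⟨h, -⟩ := List.getElem?_eq_some_iff.mp hsP1
        omega
      have hdropP1 : s.drop (P + 1) = '*' :: t0 := by
        have h := congrArg (List.drop 1) hdropP
        rw [List.drop_drop] at h
        simpa [Nat.add_comm] using h
      -- the character before P is not '*' (else '*/*' would be an infix)
      have hnostar : ¬ (pvH1 none s P = some '*') := by
        intro hstar
        apply h1
        match P, hstar, hsP, hsP1 with
        | 0, hstar, _, _ => simp [pvH1] at hstar
        | (m+1), hstar, hsP, hsP1 =>
          simp only [pvH1, Nat.add_sub_cancel, if_neg (Nat.succ_ne_zero m)] at hstar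
          refine infix_of_prefix_drop (j := m) (List.prefix_iff_getElem?.mpr ?_)
          intro i hi
          match i, hi with
          | 0, _ => rw [List.getElem?_drop]; exact hstar
          | 1, _ => rw [List.getElem?_drop]; exact hsP
          | 2, _ => rw [List.getElem?_drop]; exact hsP1
      -- A copies the prefix before P
      rw [pvM_pre P s none none (fun i hi => hmin i hi)]
      rw [hdropP, pvM]
      have hopenP : (('/' : Char) == '/' && (('*' :: t0 : List Char).head? == some '*')) = true := by
        simp
      have hcloseP : (pvH2 none none s P == some '*' && pvH1 none s P == some '/') = false := by
        rw [Bool.and_eq_false_iff]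
        match P, hsP, hsP1 with
        | 0, _, _ => left; simp [pvH2]
        | 1, _, _ => left; simp [pvH2]
        | (m+2), hsP, hsP1 =>
          by_cases hstar : s[m]? = some '*'
          · right
            rw [beq_eq_false_iff_ne]
            intro hsl
            simp only [pvH1, if_neg (Nat.succ_ne_zero (m+1))] at hsl
            apply h2
            refine infix_of_prefix_drop (j := m) (List.prefix_iff_getElem?.mpr ?_)
            intro i hi
            match i, hi with
            | 0, _ => rw [List.getElem?_drop]; exact hstar
            | 1, _ => rw [List.getElem?_drop]; exact hsl
            | 2, _ => rw [List.getElem?_drop]; exact hsP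
            | 3, _ => rw [List.getElem?_drop]; exact hsP1
          · left
            rw [beq_eq_false_iff_ne]
            intro hh
            simp only [pvH2, Nat.add_sub_cancel, if_neg (Nat.succ_ne_zero (m+1)),
              if_neg (by omega : ¬ m + 2 = 1)] at hh
            exact hstar hh
      simp only [hopenP, if_true, hcloseP, Bool.false_eq_true, if_false]
      have hcast : (P : Int) + 1 = (((P + 1 : Nat)) : Int) := by push_cast; ring
      rw [hfind, hcast]
      by_cases hq : PySem.Chars.findFrom s ['*', '/'] ((P + 1 : Nat) : Int) none < 0
      · rw [dif_pos hq]
        have hqneg : PySem.Chars.findFrom s ['*', '/'] ((P + 1 : Nat) : Int) none = -1 := by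
          by_contra hne
          have hspecq := PySem.Chars.findFrom_natCast_spec s ['*', '/'] (P + 1) (by omega) hne
          omega
        have hnoc : ¬ (['*', '/'] <:+: s.drop (P + 1)) :=
          (PySem.Chars.findFrom_natCast_eq_neg_one_iff s ['*', '/'] (P + 1) (by omega)).mp hqneg
        have hcond : ∀ i, i < ('*' :: t0).length →
            ¬ (pvH2 (pvH1 none s P) (some '/') ('*' :: t0) i = some '*' ∧
               pvH1 (some '/') ('*' :: t0) i = some '/') := by
          rintro i hi ⟨hA, hB⟩
          match i, hi, hA, hB with
          | 0, _, hA, _ =>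
            rw [pvH2] at hA
            exact hnostar hA
          | 1, _, hA, _ =>
            rw [pvH2] at hA
            simp at hA
          | (m+2), hi, hA, hB =>
            simp only [pvH2, pvH1, Nat.add_sub_cancel,
              if_neg (Nat.succ_ne_zero (m+1)),
              if_neg (by omega : ¬ m + 2 = 1)] at hA hB
            apply hnoc
            rw [hdropP1]
            exact infix_of_prefix_drop (j := m) (pair_prefix_drop.mpr ⟨hA, hB⟩)
        rw [pvM_skip (('*' :: t0).length) ('*' :: t0) (pvH1 none s P) (some '/') hcond,
          List.drop_length, pvM_nil]
        rw [PySem.List.slice_to_natCast]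
        simp
      · rw [dif_neg hq]
        have hq0' : (0 : Int) ≤ PySem.Chars.findFrom s ['*', '/'] ((P + 1 : Nat) : Int) none :=
          le_of_not_gt hq
        have hqne : PySem.Chars.findFrom s ['*', '/'] ((P + 1 : Nat) : Int) none ≠ -1 := by
          omega
        obtain ⟨hqle, hqpre, hqmin⟩ :=
          PySem.Chars.findFrom_natCast_spec s ['*', '/'] (P + 1) (by omega) hqne
        obtain ⟨Q, hfq⟩ : ∃ Q : Nat,
            PySem.Chars.findFrom s ['*', '/'] ((P + 1 : Nat) : Int) none = (Q : Int) :=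
          ⟨(PySem.Chars.findFrom s ['*', '/'] ((P + 1 : Nat) : Int) none).toNat, by omega⟩
        rw [hfq] at hqle hqpre hqmin
        simp only [Int.toNat_natCast] at hqpre hqmin
        have hPQ : P + 1 ≤ Q := by exact_mod_cast hqle
        obtain ⟨hsQ, hsQ1⟩ := pair_prefix_drop.mp hqpre
        have hQ2 : Q + 2 ≤ s.length := by
          obtain ⟨h, -⟩ := List.getElem?_eq_some_iff.mp hsQ1
          omega
        have hcond : ∀ i, i < Q - P + 1 →
            ¬ (pvH2 (pvH1 none s P) (some '/') ('*' :: t0) i = some '*' ∧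
               pvH1 (some '/') ('*' :: t0) i = some '/') := by
          rintro i hi ⟨hA, hB⟩
          match i, hi, hA, hB with
          | 0, _, hA, _ =>
            rw [pvH2] at hA
            exact hnostar hA
          | 1, _, hA, _ =>
            rw [pvH2] at hA
            simp at hA
          | (m+2), hi, hA, hB =>
            simp only [pvH2, pvH1, Nat.add_sub_cancel,
              if_neg (Nat.succ_ne_zero (m+1)),
              if_neg (by omega : ¬ m + 2 = 1)] at hA hB
            have h' : ∀ jj : Nat, ('*' :: t0)[jj]? = s[P + 1 + jj]? := by
              intro jj
              rw [← hdropP1, List.getElem?_drop]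
            have hA' : s[P + 1 + m]? = some '*' := (h' m).symm.trans hA
            have hB' : s[P + 1 + m + 1]? = some '/' := (h' (m + 1)).symm.trans hB
            exact hqmin (P + 1 + m) (by omega) (by omega) (pair_prefix_drop.mpr ⟨hA', hB'⟩)
        rw [pvM_skip (Q - P + 1) ('*' :: t0) (pvH1 none s P) (some '/') hcond]
        have hgetu : ∀ jj : Nat, ('*' :: t0)[jj]? = s[P + 1 + jj]? := by
          intro jj
          rw [← hdropP1, List.getElem?_drop]
        have hdropn : ('*' :: t0).drop (Q - P + 1) = s.drop (Q + 2) := by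
          rw [← hdropP1, List.drop_drop]
          congr 1
          omega
        have hH1n : pvH1 (some '/') ('*' :: t0) (Q - P + 1) = some '/' := by
          rw [pvH1, if_neg (by omega), Nat.add_sub_cancel, hgetu,
            show P + 1 + (Q - P) = Q + 1 from by omega]
          exact hsQ1
        have hH2n : pvH2 (pvH1 none s P) (some '/') ('*' :: t0) (Q - P + 1) = some '*' := by
          rw [pvH2, if_neg (by omega), if_neg (by omega), hgetu,
            show P + 1 + (Q - P + 1 - 2) = Q from by omega]
          exact hsQ
        rw [hH1n, hH2n, hdropn]
        have hqcast : (Q : Int) + 2 = ((Q + 2 : Nat) : Int) := by push_cast; ring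
        rw [hfq, hqcast, PySem.List.slice_to_natCast, PySem.List.slice_from_natCast]
        cases hsd : s.drop (Q + 2) with
        | nil =>
          rw [pvM_nil, pvBrec_nil]
        | cons c r =>
          rw [pvM]
          simp only [ite_self,
            show ((some '*' == some '*') && ((some '/' : Option Char) == some '/')) = true from rfl,
            if_true, Bool.false_eq_true, if_false]
          have hnotopen : ((c == '/') && (r.head? == some '*')) = false := by
            rw [Bool.and_eq_false_iff]
            by_cases hcc : c = '/'
            · right
              rw [beq_eq_false_iff_ne]
              intro hr
              apply h2
              refine infix_of_prefix_drop (j := Q) (List.prefix_iff_getElem?.mpr ?_)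
              intro i hi
              match i, hi with
              | 0, _ => rw [List.getElem?_drop]; exact hsQ
              | 1, _ => rw [List.getElem?_drop]; exact hsQ1
              | 2, _ =>
                rw [List.getElem?_drop]
                have h' : s[Q + 2]? = some c := by
                  rw [show Q + 2 = Q + 2 + 0 from rfl, ← List.getElem?_drop, hsd]
                  rfl
                rw [h', hcc]
                rfl
              | 3, _ =>
                rw [List.getElem?_drop]
                have h' : s[Q + 3]? = r.head? := by
                  rw [show Q + 3 = Q + 2 + 1 from rfl, ← List.getElem?_drop, hsd]
                  simp [List.head?_eq_getElem?]
                rw [h']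
                simpa using hr
            · left; simpa using hcc
          have hfresh : pvM none none false (c :: r) = c :: pvM none (some c) false r := by
            rw [pvM]
            simp [hnotopen]
          have hshift : pvM (some '/') (some c) false r = pvM none (some c) false r :=
            hist2_irrel (by decide) _ _ _
          rw [hshift, ← hfresh]
          have hlen' : (c :: r).length ≤ N := by
            have h' := congrArg List.length hsd
            simp only [List.length_drop, List.length_cons] at h' ⊢
            omega
          have hinf1 : ¬ (['*', '/', '*'] <:+: (c :: r)) := fun hi =>
            h1 ((hsd ▸ hi).trans (s.drop_suffix (Q + 2)).isInfix)
          have hinf2 : ¬ (['*', '/', '/', '*'] <:+: (c :: r)) := fun hi =>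
            h2 ((hsd ▸ hi).trans (s.drop_suffix (Q + 2)).isInfix)
          rw [ih (c :: r) hlen' hinf1 hinf2]

-- ===== VERDICT (by name: the statement is the Claim_ definition above) =====
theorem remove_multiline_comments_spec : Claim_unchanged_remove_multiline_comments := by
  intro strval _ hnD
  show remove_multiline_comments strval = remove_multiline_comments_alt strval
  have h1 : ¬ (['*', '/', '*'] <:+: strval.toList) := fun hi =>
    hnD (Or.inl ((PySem.Str.isIn_iff_infix (sub := "*/*") (s := strval)).mpr
      (by rw [show ("*/*" : String).toList = ['*', '/', '*'] from rfl]; exact hi)))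
  have h2 : ¬ (['*', '/', '/', '*'] <:+: strval.toList) := fun hi =>
    hnD (Or.inr ((PySem.Str.isIn_iff_infix (sub := "*//*") (s := strval)).mpr
      (by rw [show ("*//*" : String).toList = ['*', '/', '/', '*'] from rfl]; exact hi)))
  simp only [remove_multiline_comments, remove_multiline_comments_alt]
  rw [fold_eq_pvM]
  exact congrArg String.ofList (pvM_eq_pvBrec strval.toList.length strval.toList le_rfl h1 h2)

theorem remove_multiline_comments_changed : Claim_changed_remove_multiline_comments := by
  unfold Claim_changed_remove_multiline_comments
  refine ⟨by decide, by decide, by decide, ?_, by decide⟩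
  show remove_multiline_comments_alt "x*/*y" = "x*"
  simp only [remove_multiline_comments_alt]
  rw [show ("x*/*y").toList = ['x','*','/','*','y'] from rfl]
  rw [pvBrec.eq_def]
  norm_num [show PySem.Chars.find ['x','*','/','*','y'] ['/','*'] = 2 from rfl,
    show PySem.Chars.findFrom ['x','*','/','*','y'] ['*','/'] 3 none = -1 from rfl]
  decide
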